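-- pv_equiv track=rewrite | github.com/DavidMackHU/lyric | api/lyrics_service.py | extract_lyric_snippet
-- ===== SOURCE A (Python) =====
-- def extract_lyric_snippet(full_lyrics, max_length=200):
--     """Extract a snippet from full lyrics"""
--     if not full_lyrics:
--         return None
--
--     # Remove common metadata lines
--     lines = full_lyrics.split('\n')
--     clean_lines = []
--
--     for line in lines:
--         line = line.strip()
--         # Skip empty lines and common metadata
--         if line and not any(skip in line.lower() for skip in ['[verse', '[chorus', '[bridge', '[intro', '[outro']):
--             clean_lines.append(line)
--
--     # Take first few lines that fit in max_length
--     snippet = ''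
--     for line in clean_lines[:10]:  # Max 10 lines
--         if len(snippet) + len(line) + 1 <= max_length:
--             snippet += line + '\n'
--         else:
--             break
--
--     return snippet.strip() if snippet else None
-- ===== SOURCE B (Python) =====
-- def extract_lyric_snippet(full_lyrics, max_length=200):
--     """Extract a snippet from full lyrics (single fused streaming pass)."""
--     if not full_lyrics:
--         return None
--     out = []
--     budget = max_length
--     for raw in full_lyrics.split('\n'):
--         if len(out) == 10:
--             break
--         s = raw.strip()
--         if not s or any(sk in s.lower() for sk in ('[verse', '[chorus', '[bridge', '[intro', '[outro')):
--             continue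
--         if len(s) + 1 > budget:
--             break
--         out.append(s)
--         budget -= len(s) + 1
--     return '\n'.join(out) if out else None
-- ===== Notes on version B (the rewrite author's own statement) =====
-- stated objective: alternative
-- what changed: A stages separate passes (strip-and-filter every line into clean_lines, slice it to 10, then a greedy loop concatenating strings with a final strip); B is one fused streaming pass over the raw lines with a running budget and a line cap, exiting as soon as a line does not fit, and joins the collected lines once.
import Mathlib
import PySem

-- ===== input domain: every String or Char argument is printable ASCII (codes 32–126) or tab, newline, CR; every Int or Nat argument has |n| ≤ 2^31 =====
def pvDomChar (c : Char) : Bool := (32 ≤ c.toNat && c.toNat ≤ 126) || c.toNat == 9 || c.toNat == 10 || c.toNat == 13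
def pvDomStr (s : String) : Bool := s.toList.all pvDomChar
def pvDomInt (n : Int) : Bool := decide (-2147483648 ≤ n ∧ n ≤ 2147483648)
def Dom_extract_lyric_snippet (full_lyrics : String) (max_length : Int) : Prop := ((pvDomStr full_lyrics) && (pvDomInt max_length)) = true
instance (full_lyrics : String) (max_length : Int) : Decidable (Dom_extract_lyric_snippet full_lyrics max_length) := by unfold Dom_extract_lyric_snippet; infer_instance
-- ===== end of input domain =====

-- B replaces A's staged passes (strip-and-filter all lines, slice to 10, greedy string
-- concatenation plus a final strip) by ONE fused streaming pass over the raw lines with a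
-- running budget and a line cap, exiting early and joining the collected lines once.

-- ===== PORT A =====
-- the metadata markers both Pythons write as a literal list
def pvSkips : List (List Char) :=
  ["[verse".toList, "[chorus".toList, "[bridge".toList, "[intro".toList, "[outro".toList]

-- 'line and not any(skip in line.lower() for skip in [...])'
def pvKeep (line : List Char) : Bool :=
  !line.isEmpty && !(pvSkips.any (fun sk => PySem.Chars.isIn sk (PySem.Chars.lower line)))

-- A's snippet loop with its break, as structural recursion over the remaining lines
def pvTakeA (max_length : Int) : List (List Char) → List Char → List Char
  | [], snippet => snippet
  | line :: rest, snippet =>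
    if (snippet.length : Int) + (line.length : Int) + 1 ≤ max_length then
      pvTakeA max_length rest (snippet ++ line ++ ['\n'])
    else snippet

def extract_lyric_snippet (full_lyrics : String) (max_length : Int) : Option String :=
  if full_lyrics = "" then none else
  let lines := PySem.Chars.splitOn full_lyrics.toList ['\n']
  let clean_lines := lines.foldl (fun acc l =>
      let line := PySem.Chars.strip l
      if pvKeep line then acc ++ [line] else acc) []
  let snippet := pvTakeA max_length (PySem.List.slice clean_lines none (some 10)) []
  if snippet = [] then none else some (String.ofList (PySem.Chars.strip snippet))

-- ===== PORT B =====
-- B's single for-loop with its continue/break, as structural recursion over the raw lines;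
-- state = (collected lines, remaining budget)
def pvLoopB : List (List Char) → List (List Char) → Int → List (List Char)
  | [], out, _ => out
  | raw :: rest, out, budget =>
    if out.length == 10 then out
    else
      let s := PySem.Chars.strip raw
      if !pvKeep s then pvLoopB rest out budget
      else if (s.length : Int) + 1 > budget then out
      else pvLoopB rest (out ++ [s]) (budget - ((s.length : Int) + 1))

def extract_lyric_snippet_alt (full_lyrics : String) (max_length : Int) : Option String :=
  if full_lyrics = "" then none else
  let out := pvLoopB (PySem.Chars.splitOn full_lyrics.toList ['\n']) [] max_length
  if out = [] then none else some (String.ofList (PySem.Chars.join ['\n'] out))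

-- ===== PRECONDITION & SPEC =====
def Spec_extract_lyric_snippet (full_lyrics : String) (max_length : Int) (out : Option String) : Prop := out = extract_lyric_snippet_alt full_lyrics max_length
instance (full_lyrics : String) (max_length : Int) (out : Option String) : Decidable (Spec_extract_lyric_snippet full_lyrics max_length out) := by unfold Spec_extract_lyric_snippet; infer_instance

-- ===== CLAIM (what is proved, stated in full; the proofs are below) =====
def Claim_equal_extract_lyric_snippet : Prop := ∀ (full_lyrics : String) (max_length : Int), Dom_extract_lyric_snippet full_lyrics max_length → Spec_extract_lyric_snippet full_lyrics max_length (extract_lyric_snippet full_lyrics max_length)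

-- ===== LEMMAS AND PROOFS =====

-- the greedy prefix of lines that fit the budget: what A's snippet loop appends
def pvGreedy (max_length : Int) (used : Int) : List (List Char) → List (List Char)
  | [] => []
  | line :: rest =>
    if used + (line.length : Int) + 1 ≤ max_length then
      line :: pvGreedy max_length (used + (line.length : Int) + 1) rest
    else []

-- the common reference: greedy with an explicit budget and a slot counter
def pvPick (budget : Int) (slots : Nat) : List (List Char) → List (List Char)
  | [] => []
  | t :: ts =>
    if slots = 0 then []
    else if (t.length : Int) + 1 ≤ budget then t :: pvPick (budget - ((t.length : Int) + 1)) (slots - 1) ts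
    else []

def pvFlattenNL (ts : List (List Char)) : List Char := (ts.map (fun t => t ++ ['\n'])).flatten

lemma pvTakeA_eq (max_length : Int) : ∀ (ls : List (List Char)) (s : List Char),
    pvTakeA max_length ls s = s ++ pvFlattenNL (pvGreedy max_length (s.length : Int) ls) := by
  intro ls
  induction ls with
  | nil => intro s; simp [pvTakeA, pvGreedy, pvFlattenNL]
  | cons line rest ih =>
    intro s
    simp only [pvTakeA, pvGreedy]
    split_ifs with h
    · rw [ih (s ++ line ++ ['\n'])]
      have hlen : (((s ++ line ++ ['\n']).length : Nat) : Int)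
          = (s.length : Int) + (line.length : Int) + 1 := by
        simp [List.length_append]; ring
      rw [hlen]
      simp [pvFlattenNL]
    · simp [pvFlattenNL]

-- A's greedy on the first k clean lines is pvPick with k slots
lemma pvGreedy_take_eq_pick (max_length : Int) : ∀ (ls : List (List Char)) (used : Int) (k : Nat),
    pvGreedy max_length used (ls.take k) = pvPick (max_length - used) k ls := by
  intro ls
  induction ls with
  | nil => intro used k; simp [pvGreedy, pvPick]
  | cons t ts ih =>
    intro used k
    cases k with
    | zero => simp [pvGreedy, pvPick]
    | succ k =>
      simp only [List.take_succ_cons, pvGreedy, pvPick]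
      rw [if_neg (Nat.succ_ne_zero k)]
      by_cases h : used + (t.length : Int) + 1 ≤ max_length
      · rw [if_pos h, if_pos (show (t.length : Int) + 1 ≤ max_length - used by omega)]
        rw [Nat.add_sub_cancel, ih,
          show max_length - (used + (t.length : Int) + 1) = max_length - used - ((t.length : Int) + 1) from by ring]
      · rw [if_neg h, if_neg (show ¬(t.length : Int) + 1 ≤ max_length - used by omega)]

-- B's fused loop unfolds to pvPick over the stripped-and-filtered lines
lemma pvLoopB_eq_pick : ∀ (raws : List (List Char)) (out : List (List Char)) (budget : Int),
    out.length ≤ 10 →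
    pvLoopB raws out budget
      = out ++ pvPick budget (10 - out.length) ((raws.map PySem.Chars.strip).filter pvKeep) := by
  intro raws
  induction raws with
  | nil => intro out budget _; simp [pvLoopB, pvPick]
  | cons raw rest ih =>
    intro out budget hle
    simp only [pvLoopB, List.map_cons]
    by_cases h10 : out.length = 10
    · have : (out.length == 10) = true := by simp [h10]
      rw [if_pos this]
      have hslots : 10 - out.length = 0 := by omega
      rw [hslots]
      cases hfc : (PySem.Chars.strip raw :: (rest.map PySem.Chars.strip)).filter pvKeep with
      | nil => simp [pvPick]
      | cons a l => simp [pvPick]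
    · have : (out.length == 10) = false := by simp [h10]
      rw [if_neg (by simp [this])]
      by_cases hk : pvKeep (PySem.Chars.strip raw)
      · rw [if_neg (by simp [hk]), List.filter_cons_of_pos hk]
        have hslots : ¬(10 - out.length = 0) := by omega
        by_cases hfit : ((PySem.Chars.strip raw).length : Int) + 1 ≤ budget
        · rw [if_neg (show ¬((PySem.Chars.strip raw).length : Int) + 1 > budget by omega)]
          simp only [pvPick]
          rw [if_neg hslots, if_pos hfit]
          rw [ih (out ++ [PySem.Chars.strip raw]) _ (by simp; omega)]
          have : 10 - (out ++ [PySem.Chars.strip raw]).length = 10 - out.length - 1 := by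
            simp; omega
          rw [this]
          simp
        · rw [if_pos (show ((PySem.Chars.strip raw).length : Int) + 1 > budget by omega)]
          simp only [pvPick]
          rw [if_neg hslots, if_neg hfit]
          simp
      · rw [if_pos (by simp [hk]), List.filter_cons_of_neg (by simp [hk])]
        exact ih out budget hle

-- every picked line comes from the clean list
lemma pvPick_subset : ∀ (ls : List (List Char)) (budget : Int) (slots : Nat) (t : List Char),
    t ∈ pvPick budget slots ls → t ∈ ls := by
  intro ls
  induction ls with
  | nil => intro budget slots t h; simp [pvPick] at h
  | cons a as ih =>
    intro budget slots t h
    simp only [pvPick] at h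
    split_ifs at h with h1 h2
    · simp at h
    · rcases List.mem_cons.mp h with h | h
      · simp [h]
      · exact List.mem_cons_of_mem _ (ih _ _ _ h)
    · simp at h

lemma pvFlattenNL_eq_nil (ts : List (List Char)) : pvFlattenNL ts = [] ↔ ts = [] := by
  cases ts <;> simp [pvFlattenNL]

lemma pvFlattenNL_eq_join (ts : List (List Char)) (h : ts ≠ []) :
    pvFlattenNL ts = PySem.Chars.join ['\n'] ts ++ ['\n'] := by
  induction ts with
  | nil => exact absurd rfl h
  | cons t rest ih =>
    cases rest with
    | nil => simp [pvFlattenNL, PySem.Chars.join_singleton]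
    | cons b l =>
      rw [PySem.Chars.join_cons_cons]
      have : pvFlattenNL (t :: b :: l) = (t ++ ['\n']) ++ pvFlattenNL (b :: l) := by
        simp [pvFlattenNL]
      rw [this, ih (by simp)]
      simp

-- head and last of a stripped nonempty line are not whitespace
def pvGood (t : List Char) : Prop :=
  (∀ c, t.head? = some c → PySem.Chars.isspace c = false) ∧
  (∀ c, t.getLast? = some c → PySem.Chars.isspace c = false)

lemma pvStrip_good (l : List Char) : pvGood (PySem.Chars.strip l) := by
  simp only [pvGood, PySem.Chars.strip, PySem.Chars.lstrip, PySem.Chars.rstrip]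
  set y := List.dropWhile PySem.Chars.isspace l with hy
  set z := List.dropWhile PySem.Chars.isspace y.reverse with hz
  constructor
  · intro c hc
    have hzr : z.reverse ≠ [] := by intro hnil; rw [hnil] at hc; simp at hc
    have hpre : z.reverse <+: y := by
      have hsuf : z <:+ y.reverse := List.dropWhile_suffix _
      have := List.reverse_prefix.mpr hsuf
      simpa using this
    obtain ⟨r, hr⟩ := hpre
    have hyhead : y.head? = some c := by
      rw [← hr, List.head?_append_of_ne_nil _ hzr, hc]
    have hyne : y ≠ [] := by intro hnil; rw [hnil] at hyhead; simp at hyhead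
    have hchead : y.head hyne = c := by
      have h2 := List.head?_eq_some_head hyne
      rw [h2] at hyhead; exact Option.some_injective _ hyhead
    rw [← hchead]
    have := List.head_dropWhile_not PySem.Chars.isspace (l := l) (by rw [← hy]; exact hyne)
    simpa [← hy] using this
  · intro c hc
    rw [List.getLast?_reverse] at hc
    have hzne : z ≠ [] := by intro hnil; rw [hnil] at hc; simp at hc
    have hchead : z.head hzne = c := by
      have h2 := List.head?_eq_some_head hzne
      rw [h2] at hc; exact Option.some_injective _ hc
    rw [← hchead]
    have := List.head_dropWhile_not PySem.Chars.isspace (l := y.reverse) (by rw [← hz]; exact hzne)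
    simpa [← hz] using this

lemma pvJoin_ne_nil (t : List Char) (l : List (List Char)) (ht : t ≠ []) :
    PySem.Chars.join ['\n'] (t :: l) ≠ [] := by
  cases l with
  | nil => simpa [PySem.Chars.join_singleton] using ht
  | cons b r => rw [PySem.Chars.join_cons_cons]; simp

lemma pvJoin_head (ts : List (List Char)) (h : ts ≠ []) (hne : ∀ t ∈ ts, t ≠ [])
    (hg : ∀ t ∈ ts, pvGood t) :
    ∀ c, (PySem.Chars.join ['\n'] ts).head? = some c → PySem.Chars.isspace c = false := by
  intro c hc
  cases ts with
  | nil => exact absurd rfl h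
  | cons t rest =>
    cases rest with
    | nil =>
      rw [PySem.Chars.join_singleton] at hc
      exact (hg t (by simp)).1 c hc
    | cons b l =>
      rw [PySem.Chars.join_cons_cons, List.append_assoc,
        List.head?_append_of_ne_nil _ (hne t (by simp))] at hc
      exact (hg t (by simp)).1 c hc

lemma pvJoin_last (ts : List (List Char)) (h : ts ≠ []) (hne : ∀ t ∈ ts, t ≠ [])
    (hg : ∀ t ∈ ts, pvGood t) :
    ∀ c, (PySem.Chars.join ['\n'] ts).getLast? = some c → PySem.Chars.isspace c = false := by
  induction ts with
  | nil => exact absurd rfl h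
  | cons t rest ih =>
    intro c hc
    cases rest with
    | nil =>
      rw [PySem.Chars.join_singleton] at hc
      exact (hg t (by simp)).2 c hc
    | cons b l =>
      rw [PySem.Chars.join_cons_cons,
        List.getLast?_append_of_ne_nil _ (pvJoin_ne_nil b l (hne b (by simp)))] at hc
      exact ih (by simp) (fun x hx => hne x (by simp [hx])) (fun x hx => hg x (by simp [hx])) c hc

lemma pvStrip_flattenNL (ts : List (List Char)) (h : ts ≠ []) (hne : ∀ t ∈ ts, t ≠ [])
    (hg : ∀ t ∈ ts, pvGood t) :
    PySem.Chars.strip (pvFlattenNL ts) = PySem.Chars.join ['\n'] ts := by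
  rw [pvFlattenNL_eq_join ts h]
  set J := PySem.Chars.join ['\n'] ts with hJ
  have hJne : J ≠ [] := by
    cases ts with
    | nil => exact absurd rfl h
    | cons t l => exact pvJoin_ne_nil t l (hne t (by simp))
  simp only [PySem.Chars.strip, PySem.Chars.lstrip, PySem.Chars.rstrip]
  have hlstrip : List.dropWhile PySem.Chars.isspace (J ++ ['\n']) = J ++ ['\n'] := by
    cases hJc : J with
    | nil => exact absurd hJc hJne
    | cons c tl =>
      have hcns : PySem.Chars.isspace c = false := by
        apply pvJoin_head ts h hne hg
        rw [← hJ, hJc]; rfl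
      rw [List.cons_append, List.dropWhile_cons_of_neg (by simp [hcns])]
  rw [hlstrip]
  have hrev : (J ++ ['\n']).reverse = '\n' :: J.reverse := by simp
  rw [hrev, List.dropWhile_cons_of_pos (by decide)]
  have hJrev : List.dropWhile PySem.Chars.isspace J.reverse = J.reverse := by
    cases hJc : J.reverse with
    | nil => rfl
    | cons d tl =>
      have hd : J.getLast? = some d := by
        rw [← List.head?_reverse, hJc]; rfl
      have hdns : PySem.Chars.isspace d = false := pvJoin_last ts h hne hg d hd
      rw [List.dropWhile_cons_of_neg (by simp [hdns])]
  rw [hJrev, List.reverse_reverse]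

-- ===== VERDICT (by name: the statement is the Claim_ definition above) =====
theorem extract_lyric_snippet_spec : Claim_equal_extract_lyric_snippet := by
  intro full_lyrics max_length _
  unfold Spec_extract_lyric_snippet extract_lyric_snippet extract_lyric_snippet_alt
  by_cases hfull : full_lyrics = ""
  · simp [hfull]
  · simp only [if_neg hfull]
    have hclean : (PySem.Chars.splitOn full_lyrics.toList ['\n']).foldl
        (fun acc l => let line := PySem.Chars.strip l; if pvKeep line then acc ++ [line] else acc)
        ([] : List (List Char))
        = ((PySem.Chars.splitOn full_lyrics.toList ['\n']).map PySem.Chars.strip).filter pvKeep := by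
      have := PySem.List.foldl_append_if (fun l => pvKeep (PySem.Chars.strip l))
        (fun l => PySem.Chars.strip l) (PySem.Chars.splitOn full_lyrics.toList ['\n'])
        ([] : List (List Char))
      simpa [List.filter_map, Function.comp] using this
    rw [hclean]
    set clean := ((PySem.Chars.splitOn full_lyrics.toList ['\n']).map PySem.Chars.strip).filter pvKeep
      with hcleandef
    have hmem : ∀ t ∈ clean, t ≠ [] ∧ pvGood t := by
      intro t ht
      rw [hcleandef] at ht
      obtain ⟨htm, htk⟩ := List.mem_filter.mp ht
      obtain ⟨l, _, hl⟩ := List.mem_map.mp htm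
      refine ⟨?_, hl ▸ pvStrip_good l⟩
      simp only [pvKeep, Bool.and_eq_true, Bool.not_eq_true'] at htk
      simpa using htk.1
    have hslice : PySem.List.slice clean none (some 10) = clean.take 10 := by
      rw [PySem.List.slice_to _ (by norm_num)]; rfl
    rw [hslice, pvTakeA_eq max_length (clean.take 10) []]
    simp only [List.length_nil, Nat.cast_zero, List.nil_append]
    rw [pvGreedy_take_eq_pick max_length clean 0 10]
    rw [pvLoopB_eq_pick (PySem.Chars.splitOn full_lyrics.toList ['\n']) [] max_length (by simp)]
    simp only [List.length_nil, List.nil_append, ← hcleandef]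
    have hsub : max_length - 0 = max_length := by ring
    rw [hsub]
    set g := pvPick max_length 10 clean with hgdef
    by_cases hg : g = []
    · simp [hg, pvFlattenNL]
    · have hne : ∀ t ∈ g, t ≠ [] := fun t ht => (hmem t (pvPick_subset clean _ _ t (hgdef ▸ ht))).1
      have hgood : ∀ t ∈ g, pvGood t := fun t ht => (hmem t (pvPick_subset clean _ _ t (hgdef ▸ ht))).2
      have h1 : pvFlattenNL g ≠ [] := by rw [Ne, pvFlattenNL_eq_nil]; exact hg
      rw [if_neg h1, if_neg hg, pvStrip_flattenNL g hg hne hgood]
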